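-- pv_equiv track=rewrite | github.com/bintescu/Unit-Testing-with-Python | PowerfulNumber/__init__.py | cubPrim
-- ===== SOURCE A (Python) =====
-- from math import sqrt
--
-- def cubPrim(arg):
--     if(arg < 3):
--         return False
--     else:
--         #Luam toate numerele prime de la 2 la arg si le verificam pe fiecare in parte
--         for number in range(2, arg+1):
--             is_prime = True
--             for i in range(2, int(sqrt(number)) + 1):
--                 if (number % i == 0):
--                     is_prime = False
--                     break
--             if is_prime and pow(number,3) == arg:
--                 return True
--         return False
-- ===== SOURCE B (Python) =====
-- from math import sqrt
--
-- def cubPrim(arg):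
--     if arg < 8:
--         return False
--     # integer cube root by binary search
--     lo, hi = 1, arg
--     while lo < hi:
--         mid = (lo + hi + 1) // 2
--         if mid * mid * mid <= arg:
--             lo = mid
--         else:
--             hi = mid - 1
--     r = lo
--     if r * r * r != arg:
--         return False
--     for d in range(2, int(sqrt(r)) + 1):
--         if r % d == 0:
--             return False
--     return True
-- ===== Notes on version B (the rewrite author's own statement) =====
-- stated objective: faster
-- what changed: Instead of scanning every number from 2 to arg and testing each for primality, B computes the integer cube root of arg by binary search, checks that it cubes back to arg, and trial-divides only that one root.
import Mathlib
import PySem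

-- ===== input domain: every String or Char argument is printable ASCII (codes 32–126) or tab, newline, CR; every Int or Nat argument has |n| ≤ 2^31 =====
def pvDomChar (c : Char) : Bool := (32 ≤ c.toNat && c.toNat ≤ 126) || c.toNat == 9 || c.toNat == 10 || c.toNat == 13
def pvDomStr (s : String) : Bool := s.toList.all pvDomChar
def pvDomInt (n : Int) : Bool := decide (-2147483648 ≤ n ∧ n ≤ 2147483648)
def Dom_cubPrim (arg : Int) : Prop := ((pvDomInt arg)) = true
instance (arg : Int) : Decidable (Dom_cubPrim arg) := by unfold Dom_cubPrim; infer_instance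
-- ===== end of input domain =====

-- B replaces A's scan of every number 2..arg by a binary-search integer cube root plus one
-- trial-division primality check of the root (objective: faster).

-- ===== PORT A =====
-- int(math.sqrt(n)) ported as Nat.sqrt n.toNat: exact for 0 ≤ n ≤ 2^31+1 (double sqrt is
-- correctly rounded and the rounding error is far below the gap to the next integer there).
def pySqrtInt (n : Int) : Int := (Nat.sqrt n.toNat : Int)

-- inner loop 'for i in range(2, int(sqrt(number))+1): if number % i == 0: is_prime=False; break'
def aIsPrime (number : Int) : Bool :=
  (PySem.List.pyRange 2 (pySqrtInt number + 1) 1).all (fun i => !(PySem.Int.mod number i == 0))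

def cubPrim (arg : Int) : Bool :=
  if arg < 3 then false
  else
    -- 'for number in range(2, arg+1): if is_prime and pow(number,3)==arg: return True' / 'return False'
    (PySem.List.pyRange 2 (arg + 1) 1).any (fun number => aIsPrime number && number ^ 3 == arg)

-- ===== PORT B =====
-- 'while lo < hi: mid = (lo+hi+1)//2; …' (binary search for the integer cube root);
-- the Nat fuel only bounds the iteration count ((hi-lo)+1 always suffices) to make the loop total
def bsLoop (arg : Int) : Nat → Int → Int → Int
  | 0, lo, _ => lo
  | Nat.succ fuel, lo, hi =>
    if lo < hi then
      let mid := PySem.Int.floordiv (lo + hi + 1) 2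
      if mid * mid * mid ≤ arg then bsLoop arg fuel mid hi else bsLoop arg fuel lo (mid - 1)
    else lo

def cubPrim_alt (arg : Int) : Bool :=
  if arg < 8 then false
  else
    let r := bsLoop arg ((arg - 1).toNat + 1) 1 arg
    if !(r * r * r == arg) then false
    else
      -- 'for d in range(2, int(sqrt(r))+1): if r % d == 0: return False' / 'return True'
      (PySem.List.pyRange 2 (pySqrtInt r + 1) 1).all (fun d => !(PySem.Int.mod r d == 0))

-- ===== PRECONDITION & SPEC =====
def Spec_cubPrim (arg : Int) (out : Bool) : Prop := out = cubPrim_alt arg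
instance (arg : Int) (out : Bool) : Decidable (Spec_cubPrim arg out) := by unfold Spec_cubPrim; infer_instance

-- ===== CLAIM (what is proved, stated in full; the proofs are below) =====
def Claim_equal_cubPrim : Prop := ∀ (arg : Int), Dom_cubPrim arg → Spec_cubPrim arg (cubPrim arg)

-- ===== LEMMAS AND PROOFS =====

lemma cube_lt_cube (n r : Int) (hn : 0 ≤ n) (h : n < r) : n * n * n < r * r * r := by
  nlinarith [sq_nonneg (n + r), sq_nonneg (n - r), mul_nonneg hn hn]

-- A returns true iff some n ≥ 2 with n³ = arg passes A's trial-division test.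
lemma cubPrim_true_iff (arg : Int) :
    cubPrim arg = true ↔ ∃ n : Int, 2 ≤ n ∧ n * n * n = arg ∧ aIsPrime n = true := by
  unfold cubPrim
  constructor
  · intro h
    split at h
    · simp at h
    · rcases List.any_eq_true.mp h with ⟨n, hn, hp⟩
      rw [PySem.List.mem_pyRange_one] at hn
      simp only [Bool.and_eq_true, beq_iff_eq] at hp
      exact ⟨n, hn.1, by rw [← hp.2]; ring, hp.1⟩
  · rintro ⟨n, hn2, hcube, hprime⟩
    have harg : n ≤ arg := by nlinarith
    rw [if_neg (by nlinarith)]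
    exact List.any_eq_true.mpr ⟨n, PySem.List.mem_pyRange_one.mpr ⟨hn2, by omega⟩,
      by simp [hprime]; rw [← hcube]; ring⟩

-- binary-search invariant: with enough fuel the loop returns r with lo ≤ r ≤ hi, r³ ≤ arg < (r+1)³
lemma bsLoop_spec : ∀ (fuel : Nat) (arg lo hi : Int), (hi - lo).toNat ≤ fuel → lo ≤ hi →
    lo * lo * lo ≤ arg → arg < (hi + 1) * (hi + 1) * (hi + 1) →
    lo ≤ bsLoop arg fuel lo hi ∧ bsLoop arg fuel lo hi ≤ hi ∧
    (bsLoop arg fuel lo hi) * (bsLoop arg fuel lo hi) * (bsLoop arg fuel lo hi) ≤ arg ∧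
    arg < (bsLoop arg fuel lo hi + 1) * (bsLoop arg fuel lo hi + 1) * (bsLoop arg fuel lo hi + 1) := by
  intro fuel
  induction fuel with
  | zero =>
    intro arg lo hi hf h2 h3 h4
    simp only [bsLoop]
    refine ⟨le_refl _, h2, h3, ?_⟩
    rw [show lo = hi from by omega]
    exact h4
  | succ fuel ih =>
    intro arg lo hi hf h2 h3 h4
    simp only [bsLoop]
    by_cases hlt : lo < hi
    · rw [if_pos hlt]
      have hb := PySem.Int.floordiv_two_mid_bounds (lo := lo + 1) (hi := hi) (by omega)
      have heq : lo + 1 + hi = lo + hi + 1 := by ring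
      rw [heq] at hb
      set m := PySem.Int.floordiv (lo + hi + 1) 2 with hm
      by_cases hcube : m * m * m ≤ arg
      · rw [if_pos hcube]
        have := ih arg m hi (by omega) (by omega) hcube h4
        exact ⟨by omega, this.2.1, this.2.2.1, this.2.2.2⟩
      · rw [if_neg hcube]
        have h4' : arg < (m - 1 + 1) * (m - 1 + 1) * (m - 1 + 1) := by
          rw [show m - 1 + 1 = m from by ring]
          exact lt_of_not_ge hcube
        have := ih arg lo (m - 1) (by omega) (by omega) h3 h4'
        exact ⟨this.1, by omega, this.2.2.1, this.2.2.2⟩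
    · rw [if_neg hlt]
      refine ⟨le_refl _, h2, h3, ?_⟩
      rw [show lo = hi from by omega]
      exact h4

-- a nonnegative integer is pinned down by the cube bracket r³ ≤ n³ < (r+1)³
lemma cube_eq_unique (n r : Int) (hn : 0 ≤ n) (hr : 0 ≤ r)
    (h1 : r * r * r ≤ n * n * n) (h2 : n * n * n < (r + 1) * (r + 1) * (r + 1)) : n = r := by
  rcases lt_trichotomy n r with h | h | h
  · exact absurd h1 (not_le.mpr (cube_lt_cube n r hn h))
  · exact h
  · have : r + 1 ≤ n := by omega
    rcases lt_or_eq_of_le this with h' | h'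
    · exact absurd h2 (not_lt.mpr (le_of_lt (cube_lt_cube (r + 1) n (by omega) h')))
    · rw [h'] at h2
      exact absurd h2 (lt_irrefl _)

-- cubPrim_alt's value for arg ≥ 8, in terms of the cube-root bracket
lemma alt_true_iff (arg : Int) (h8 : 8 ≤ arg) :
    cubPrim_alt arg = true ↔
      (bsLoop arg ((arg - 1).toNat + 1) 1 arg) * (bsLoop arg ((arg - 1).toNat + 1) 1 arg) * (bsLoop arg ((arg - 1).toNat + 1) 1 arg) = arg ∧
      aIsPrime (bsLoop arg ((arg - 1).toNat + 1) 1 arg) = true := by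
  unfold cubPrim_alt
  rw [if_neg (by omega)]
  set r := bsLoop arg ((arg - 1).toNat + 1) 1 arg with hr
  by_cases hc : r * r * r = arg
  · rw [if_neg (by simp [hc])]
    exact ⟨fun h => ⟨hc, h⟩, fun h => h.2⟩
  · rw [if_pos (by simp [hc])]
    exact iff_of_false (by simp) (fun h => hc h.1)

lemma cubPrim_eq_alt (arg : Int) : cubPrim arg = cubPrim_alt arg := by
  by_cases h8 : arg < 8
  · have halt : cubPrim_alt arg = false := by unfold cubPrim_alt; rw [if_pos h8]
    rw [halt]
    cases hcp : cubPrim arg with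
    | false => rfl
    | true =>
      exfalso
      rcases (cubPrim_true_iff arg).mp hcp with ⟨n, hn2, hcube, _⟩
      nlinarith
  · rw [not_lt] at h8
    obtain ⟨hr1, hrle, hrc, hrc1⟩ := bsLoop_spec ((arg - 1).toNat + 1) arg 1 arg (by omega) (by omega) (by omega) (by nlinarith)
    rw [Bool.eq_iff_iff, cubPrim_true_iff, alt_true_iff arg h8]
    constructor
    · rintro ⟨n, hn2, hcube, hprime⟩
      have hnr : n = bsLoop arg ((arg - 1).toNat + 1) 1 arg :=
        cube_eq_unique n _ (by omega) (by omega) (by omega) (by omega)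
      rw [hnr] at hcube hprime
      exact ⟨hcube, hprime⟩
    · rintro ⟨hc, hp⟩
      refine ⟨bsLoop arg ((arg - 1).toNat + 1) 1 arg, ?_, hc, hp⟩
      nlinarith

-- ===== VERDICT (by name: the statement is the Claim_ definition above) =====
theorem cubPrim_spec : Claim_equal_cubPrim := by
  intro arg _
  exact cubPrim_eq_alt arg
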